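-- pv_equiv track=rewrite | github.com/weiyutang1010/REU_Partition | sampling/Qx.py | valid_seq
-- ===== SOURCE A (Python) =====
-- from itertools import product
--
-- def valid_seq(y, targeted):
--     x = []
--
--     pairs = []
--     unpairs = []
--     stack = []
--     for j, c in enumerate(y):
--         if c == '(':
--             stack.append(j)
--         elif c == ')':
--             pairs.append((stack.pop(), j))
--         else:
--             unpairs.append(j)
--
--     if targeted:
--         seq = ['A'] * len(y)
--         for combination in product(['CG', 'GC'], repeat=len(pairs)):
--             for idx, pair in enumerate(combination):
--                 i, j = pairs[idx]
--                 seq[i] = pair[0]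
--                 seq[j] = pair[1]
--             x.append("".join(seq))
--     else:
--         seq = ['A'] * len(y)
--         for comb1 in product(['CG', 'GC', 'AU', 'UA', 'GU', 'UG'], repeat=len(pairs)):
--             for comb2 in product(['A', 'C', 'G', 'U'], repeat=len(unpairs)):
--                 for idx, pair in enumerate(comb1):
--                     i, j = pairs[idx]
--                     seq[i] = pair[0]
--                     seq[j] = pair[1]
--
--                 for idx, c in enumerate(comb2):
--                     seq[unpairs[idx]] = c
--
--                 x.append("".join(seq))
--
--     return x
-- ===== SOURCE B (Python) =====
-- def valid_seq(y, targeted):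
--     pairs, unpairs, stack = [], [], []
--     for j, c in enumerate(y):
--         if c == '(':
--             stack.append(j)
--         elif c == ')':
--             pairs.append((stack.pop(), j))
--         else:
--             unpairs.append(j)
--
--     pair_opts = ['CG', 'GC'] if targeted else ['CG', 'GC', 'AU', 'UA', 'GU', 'UG']
--     out = []
--     buf = ['A'] * len(y)
--
--     def rec_unpaired(k):
--         if k == len(unpairs):
--             out.append(''.join(buf))
--             return
--         for c in 'ACGU':
--             buf[unpairs[k]] = c
--             rec_unpaired(k + 1)
--
--     def rec_pairs(k):
--         if k == len(pairs):
--             if targeted: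
--                 out.append(''.join(buf))
--             else:
--                 rec_unpaired(0)
--             return
--         i, j = pairs[k]
--         for d in pair_opts:
--             buf[i], buf[j] = d[0], d[1]
--             rec_pairs(k + 1)
--
--     rec_pairs(0)
--     return out
-- ===== Notes on version B (the rewrite author's own statement) =====
-- stated objective: alternative
-- what changed: Replaced the itertools.product enumeration writing into a shared buffer carried across iterations by a recursive backtracking generator that assigns pair slots, then unpaired slots, and joins at the base case.
import Mathlib
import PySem

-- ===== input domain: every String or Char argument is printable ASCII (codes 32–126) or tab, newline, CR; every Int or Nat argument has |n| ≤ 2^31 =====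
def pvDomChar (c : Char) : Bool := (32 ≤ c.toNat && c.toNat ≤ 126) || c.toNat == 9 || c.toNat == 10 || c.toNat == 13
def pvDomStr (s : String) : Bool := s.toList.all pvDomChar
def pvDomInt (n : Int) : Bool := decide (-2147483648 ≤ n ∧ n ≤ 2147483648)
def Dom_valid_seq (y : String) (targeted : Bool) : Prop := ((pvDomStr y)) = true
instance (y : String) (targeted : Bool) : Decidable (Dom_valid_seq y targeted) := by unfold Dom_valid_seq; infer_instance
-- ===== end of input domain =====

-- B replaces the itertools.product enumeration over a shared mutable buffer by recursive
-- backtracking over pairs then unpaired slots (objective: alternative decomposition).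

-- ===== PORT A =====
-- shared parse loop (identical in A and B): stack scan collecting pairs and unpaired indices
def pvParseGo : List Char → Nat → List Nat → List (Nat × Nat) → List Nat → List (Nat × Nat) × List Nat
  | [], _, _, pairs, unpairs => (pairs, unpairs)
  | c :: rest, j, stack, pairs, unpairs =>
    if c = '(' then pvParseGo rest (j+1) (j :: stack) pairs unpairs
    else if c = ')' then
      match stack with
      | t :: s => pvParseGo rest (j+1) s (pairs ++ [(t, j)]) unpairs
      | [] => pvParseGo rest (j+1) [] pairs unpairs   -- Python raises IndexError here; excluded by Pre_
    else pvParseGo rest (j+1) stack pairs (unpairs ++ [j])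

def pvParse (cs : List Char) : List (Nat × Nat) × List Nat := pvParseGo cs 0 [] [] []

-- itertools.product(opts, repeat=n), tuples as lists, rightmost varies fastest
def prodRepeat {α : Type} (opts : List α) : Nat → List (List α)
  | 0 => [[]]
  | n+1 => opts.flatMap (fun o => (prodRepeat opts n).map (o :: ·))

-- for idx, pair in enumerate(comb): i, j = pairs[idx]; seq[i] = pair[0]; seq[j] = pair[1]
def applyP (pairs : List (Nat × Nat)) (comb : List String) (sq : List Char) : List Char :=
  (comb.zip pairs).foldl
    (fun sq x => (sq.set x.2.1 (x.1.toList.getD 0 'A')).set x.2.2 (x.1.toList.getD 1 'A')) sq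

-- for idx, c in enumerate(comb2): seq[unpairs[idx]] = c
def applyU (unpairs : List Nat) (comb : List Char) (sq : List Char) : List Char :=
  (comb.zip unpairs).foldl (fun sq x => sq.set x.2 x.1) sq

def valid_seq (y : String) (targeted : Bool) : List String :=
  let p := pvParse y.toList
  let pairs := p.1
  let unpairs := p.2
  let seq0 : List Char := List.replicate y.toList.length 'A'
  if targeted then
    ((prodRepeat ["CG", "GC"] pairs.length).foldl
      (fun st comb =>
        let sq := applyP pairs comb st.2
        (st.1 ++ [String.ofList sq], sq)) (([] : List String), seq0)).1
  else
    ((prodRepeat ["CG", "GC", "AU", "UA", "GU", "UG"] pairs.length).foldl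
      (fun st c1 =>
        (prodRepeat ['A', 'C', 'G', 'U'] unpairs.length).foldl
          (fun st2 c2 =>
            let sq := applyU unpairs c2 (applyP pairs c1 st2.2)
            (st2.1 ++ [String.ofList sq], sq)) st) (([] : List String), seq0)).1

-- ===== PORT B =====
-- rec_unpaired: deepest recursion level, assigns unpaired slots, A/C/G/U
def goUnp : List Nat → List Char → List String
  | [], buf => [String.ofList buf]
  | u :: rest, buf => ['A', 'C', 'G', 'U'].flatMap (fun c => goUnp rest (buf.set u c))

-- rec_pairs: assigns each pair one allowed dinucleotide, then descends to unpaired slots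
def goPairs (pairOpts : List String) (targeted : Bool) (unpairs : List Nat) :
    List (Nat × Nat) → List Char → List String
  | [], buf => if targeted then [String.ofList buf] else goUnp unpairs buf
  | ij :: rest, buf =>
    pairOpts.flatMap (fun d =>
      goPairs pairOpts targeted unpairs rest
        ((buf.set ij.1 (d.toList.getD 0 'A')).set ij.2 (d.toList.getD 1 'A')))

def valid_seq_alt (y : String) (targeted : Bool) : List String :=
  let p := pvParse y.toList
  let pairOpts := if targeted then ["CG", "GC"] else ["CG", "GC", "AU", "UA", "GU", "UG"]
  goPairs pairOpts targeted p.2 p.1 (List.replicate y.toList.length 'A')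

-- ===== PRECONDITION & SPEC =====
-- Pre_ excludes exactly the unbalanced structures (some prefix has more ')' than '('),
-- on which Python A raises IndexError from stack.pop() (B raises there too).
def Pre_valid_seq (y : String) (targeted : Bool) : Prop :=
  ∀ n, n ≤ y.toList.length → (y.toList.take n).count ')' ≤ (y.toList.take n).count '('
instance (y : String) (targeted : Bool) : Decidable (Pre_valid_seq y targeted) := by
  unfold Pre_valid_seq; infer_instance
def pvWitness_valid_seq : String × Bool := ("(.)", true)

def Spec_valid_seq (y : String) (targeted : Bool) (out : List String) : Prop := out = valid_seq_alt y targeted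
instance (y : String) (targeted : Bool) (out : List String) : Decidable (Spec_valid_seq y targeted out) := by unfold Spec_valid_seq; infer_instance

-- ===== CLAIM (what is proved, stated in full; the proofs are below) =====
def Claim_equal_valid_seq : Prop := ∀ (y : String) (targeted : Bool), Dom_valid_seq y targeted → Pre_valid_seq y targeted → Spec_valid_seq y targeted (valid_seq y targeted)

-- ===== LEMMAS AND PROOFS =====

-- proof-only view of the assignment passes: a list of (position, char) updates applied by foldl set
def applyUpd (us : List (Nat × Char)) (s : List Char) : List Char :=
  us.foldl (fun s u => s.set u.1 u.2) s

def updsP (pairs : List (Nat × Nat)) (comb : List String) : List (Nat × Char) :=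
  (comb.zip pairs).flatMap
    (fun x => [(x.2.1, x.1.toList.getD 0 'A'), (x.2.2, x.1.toList.getD 1 'A')])

def updsU (unpairs : List Nat) (comb : List Char) : List (Nat × Char) :=
  (comb.zip unpairs).map (fun x => (x.2, x.1))

def keysK (pairs : List (Nat × Nat)) : List Nat := pairs.flatMap (fun ij => [ij.1, ij.2])

theorem applyUpd_append (a b : List (Nat × Char)) (s : List Char) :
    applyUpd (a ++ b) s = applyUpd b (applyUpd a s) := by
  simp [applyUpd, List.foldl_append]

theorem applyP_eq_applyUpd : ∀ (comb : List String) (prs : List (Nat × Nat)) (s : List Char),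
    applyP prs comb s = applyUpd (updsP prs comb) s
  | [], prs, s => by simp [applyP, updsP, applyUpd]
  | c :: cs, [], s => by simp [applyP, updsP, applyUpd]
  | c :: cs, ij :: prs, s => by
    simp only [applyP, updsP, applyUpd, List.zip_cons_cons, List.flatMap_cons, List.foldl_cons,
      List.foldl_append, List.foldl_nil]
    exact applyP_eq_applyUpd cs prs _

theorem applyU_eq_applyUpd : ∀ (comb : List Char) (unp : List Nat) (s : List Char),
    applyU unp comb s = applyUpd (updsU unp comb) s
  | [], unp, s => by simp [applyU, updsU, applyUpd]
  | c :: cs, [], s => by simp [applyU, updsU, applyUpd]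
  | c :: cs, u :: unp, s => by
    simp only [applyU, updsU, applyUpd, List.zip_cons_cons, List.map_cons, List.foldl_cons]
    exact applyU_eq_applyUpd cs unp _

theorem length_applyUpd : ∀ (us : List (Nat × Char)) (s : List Char),
    (applyUpd us s).length = s.length
  | [], s => rfl
  | u :: us, s => by
    show (applyUpd us (s.set u.1 u.2)).length = s.length
    rw [length_applyUpd us]; simp

theorem getElem?_applyUpd_notMem : ∀ (us : List (Nat × Char)) (s : List Char) (k : Nat),
    k ∉ us.map Prod.fst → (applyUpd us s)[k]? = s[k]?
  | [], s, k, _ => rfl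
  | u :: us, s, k, h => by
    simp only [List.map_cons, List.mem_cons, not_or] at h
    show (applyUpd us (s.set u.1 u.2))[k]? = s[k]?
    rw [getElem?_applyUpd_notMem us _ k h.2, List.getElem?_set_ne (fun e => h.1 e.symm)]

theorem applyUpd_congr : ∀ (us : List (Nat × Char)) (s t : List Char),
    s.length = t.length → (∀ k, k ∈ us.map Prod.fst ∨ s[k]? = t[k]?) →
    applyUpd us s = applyUpd us t
  | [], s, t, _, h => by
    apply List.ext_getElem?
    intro k
    rcases h k with hk | hk
    · simp at hk
    · exact hk
  | u :: us, s, t, hl, h => by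
    show applyUpd us (s.set u.1 u.2) = applyUpd us (t.set u.1 u.2)
    apply applyUpd_congr us _ _ (by simp [hl])
    intro k
    by_cases hk : k = u.1
    · subst hk
      right
      by_cases hlt : u.1 < s.length
      · rw [List.getElem?_set_self hlt, List.getElem?_set_self (hl ▸ hlt)]
      · rw [List.getElem?_set, List.getElem?_set]
        simp [hlt, hl ▸ hlt]
    · rcases h k with hm | hm
      · simp only [List.map_cons, List.mem_cons] at hm
        rcases hm with hm | hm
        · exact absurd hm hk
        · left; exact hm
      · right
        rw [List.getElem?_set_ne (fun e => hk e.symm), List.getElem?_set_ne (fun e => hk e.symm)]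
        exact hm

theorem keys_updsP : ∀ (prs : List (Nat × Nat)) (comb : List String),
    comb.length = prs.length → (updsP prs comb).map Prod.fst = keysK prs
  | [], comb, h => by simp [updsP, keysK]
  | ij :: prs, [], h => by simp at h
  | ij :: prs, c :: cs, h => by
    simp only [List.length_cons, Nat.add_right_cancel_iff] at h
    simp only [updsP, keysK, List.zip_cons_cons, List.flatMap_cons, List.map_append]
    rw [show ((cs.zip prs).flatMap
        (fun x => [(x.2.1, x.1.toList.getD 0 'A'), (x.2.2, x.1.toList.getD 1 'A')])).map Prod.fst
        = (updsP prs cs).map Prod.fst from rfl, keys_updsP prs cs h]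
    rfl

theorem keys_updsU : ∀ (unp : List Nat) (comb : List Char),
    comb.length = unp.length → (updsU unp comb).map Prod.fst = unp
  | [], comb, h => by simp [updsU]
  | u :: unp, [], h => by simp at h
  | u :: unp, c :: cs, h => by
    simp only [List.length_cons, Nat.add_right_cancel_iff] at h
    simp only [updsU, List.zip_cons_cons, List.map_cons]
    rw [show ((cs.zip unp).map (fun x => (x.2, x.1))).map Prod.fst
        = (updsU unp cs).map Prod.fst from rfl, keys_updsU unp cs h]

theorem length_mem_prodRepeat {α : Type} (opts : List α) :
    ∀ (n : Nat) (c : List α), c ∈ prodRepeat opts n → c.length = n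
  | 0, c, h => by simp [prodRepeat] at h; simp [h]
  | n + 1, c, h => by
    simp only [prodRepeat, List.mem_flatMap, List.mem_map] at h
    obtain ⟨o, _, t, ht, rfl⟩ := h
    simp [length_mem_prodRepeat opts n t ht]

-- the shared-buffer fold of A collapses to a map over the combinations
theorem foldElim {γ : Type} (f : γ → List Char → List Char) (K : List Nat) (s0 : List Char) :
    ∀ (L : List γ),
    (∀ c ∈ L, ∀ s t : List Char, s.length = s0.length → t.length = s0.length →
        (∀ k, k ∈ K ∨ s[k]? = t[k]?) → f c s = f c t) →
    (∀ c ∈ L, ∀ s : List Char, (f c s).length = s.length) →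
    (∀ c ∈ L, ∀ (s : List Char) (k : Nat), k ∉ K → (f c s)[k]? = s[k]?) →
    ∀ (acc : List String) (b : List Char),
    b.length = s0.length → (∀ k : Nat, k ∈ K ∨ b[k]? = s0[k]?) →
    (L.foldl (fun st c => (st.1 ++ [String.ofList (f c st.2)], f c st.2)) (acc, b)).1
      = acc ++ L.map (fun c => String.ofList (f c s0))
  | [], _, _, _, acc, b, _, _ => by simp
  | c :: L, hdep, hlen, hout, acc, b, hb, hagr => by
    simp only [List.foldl_cons, List.map_cons]
    have hfb : f c b = f c s0 :=
      hdep c (List.mem_cons_self) b s0 hb rfl hagr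
    rw [foldElim f K s0 L
      (fun c hc => hdep c (List.mem_cons_of_mem _ hc))
      (fun c hc => hlen c (List.mem_cons_of_mem _ hc))
      (fun c hc => hout c (List.mem_cons_of_mem _ hc))
      (acc ++ [String.ofList (f c b)]) (f c b)
      (by rw [hlen c List.mem_cons_self, hb])
      (by
        intro k
        by_cases hk : k ∈ K
        · left; exact hk
        · right
          rw [hout c List.mem_cons_self b k hk]
          rcases hagr k with h | h
          · exact absurd h hk
          · exact h)]
    simp [hfb]

-- B's recursions as maps over the combination lists
theorem goUnp_eq : ∀ (unp : List Nat) (buf : List Char),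
    goUnp unp buf
      = (prodRepeat ['A', 'C', 'G', 'U'] unp.length).map
          (fun c2 => String.ofList (applyU unp c2 buf))
  | [], buf => by simp [goUnp, prodRepeat, applyU]
  | u :: unp, buf => by
    simp only [goUnp, List.length_cons, prodRepeat, List.map_flatMap, List.map_map]
    refine List.flatMap_congr (fun c _ => ?_)
    rw [goUnp_eq unp (buf.set u c)]
    rfl

theorem goPairs_eq (opts : List String) (targ : Bool) (unp : List Nat) :
    ∀ (prs : List (Nat × Nat)) (buf : List Char),
    goPairs opts targ unp prs buf
      = (prodRepeat opts prs.length).flatMap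
          (fun c => if targ then [String.ofList (applyP prs c buf)] else goUnp unp (applyP prs c buf))
  | [], buf => by simp [goPairs, prodRepeat, applyP]
  | ij :: prs, buf => by
    simp only [goPairs, List.length_cons, prodRepeat, List.flatMap_map, List.flatMap_assoc]
    refine List.flatMap_congr (fun d _ => ?_)
    rw [goPairs_eq opts targ unp prs]
    refine List.flatMap_congr (fun c _ => ?_)
    rfl

-- the composite assignment of the untargeted branch, as one update list
theorem comp_eq_applyUpd (pairs : List (Nat × Nat)) (unp : List Nat)
    (c1 : List String) (c2 : List Char) (s : List Char) :
    applyU unp c2 (applyP pairs c1 s) = applyUpd (updsP pairs c1 ++ updsU unp c2) s := by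
  rw [applyUpd_append, applyP_eq_applyUpd, applyU_eq_applyUpd]

-- nested product loop of the untargeted branch = single fold over the flattened product
theorem foldl_prod (prs : List (Nat × Nat)) (unp : List Nat) :
    ∀ (L1 : List (List String)) (L2 : List (List Char)) (st : List String × List Char),
    L1.foldl (fun st c1 => L2.foldl (fun st2 c2 =>
        (st2.1 ++ [String.ofList (applyU unp c2 (applyP prs c1 st2.2))],
          applyU unp c2 (applyP prs c1 st2.2))) st) st
      = (L1.flatMap (fun c1 => L2.map (fun c2 => (c1, c2)))).foldl
          (fun st c =>
            (st.1 ++ [String.ofList (applyU unp c.2 (applyP prs c.1 st.2))],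
              applyU unp c.2 (applyP prs c.1 st.2))) st
  | [], L2, st => by simp
  | c1 :: L1, L2, st => by
    simp only [List.foldl_cons, List.flatMap_cons, List.foldl_append, List.foldl_map]
    exact foldl_prod prs unp L1 L2 _

-- the three foldElim side conditions for the composite update of the untargeted branch
theorem hyps_comp (prs : List (Nat × Nat)) (unp : List Nat) (s0 : List Char)
    (c : List String × List Char) (h1 : c.1.length = prs.length) (h2 : c.2.length = unp.length) :
    (∀ s t : List Char, s.length = s0.length → t.length = s0.length →
        (∀ k, k ∈ keysK prs ++ unp ∨ s[k]? = t[k]?) →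
        applyU unp c.2 (applyP prs c.1 s) = applyU unp c.2 (applyP prs c.1 t)) ∧
    (∀ s : List Char, (applyU unp c.2 (applyP prs c.1 s)).length = s.length) ∧
    (∀ (s : List Char) (k : Nat), k ∉ keysK prs ++ unp →
        (applyU unp c.2 (applyP prs c.1 s))[k]? = s[k]?) := by
  have hkeys : (updsP prs c.1 ++ updsU unp c.2).map Prod.fst = keysK prs ++ unp := by
    rw [List.map_append, keys_updsP prs c.1 h1, keys_updsU unp c.2 h2]
  refine ⟨?_, ?_, ?_⟩
  · intro s t hs ht hag
    rw [comp_eq_applyUpd, comp_eq_applyUpd]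
    exact applyUpd_congr _ s t (by rw [hs, ht]) (fun k => by rw [hkeys]; exact hag k)
  · intro s
    rw [comp_eq_applyUpd, length_applyUpd]
  · intro s k hk
    rw [comp_eq_applyUpd, getElem?_applyUpd_notMem _ s k (by rw [hkeys]; exact hk)]

-- ===== VERDICT (by name: the statement is the Claim_ definition above) =====
theorem valid_seq_spec : Claim_equal_valid_seq := by
  intro y targ _ _
  unfold Spec_valid_seq
  simp only [valid_seq, valid_seq_alt]
  cases targ with
  | true =>
    simp only [reduceIte]
    rw [goPairs_eq]
    simp only [reduceIte]
    have h := foldElim (fun (c : List String) s => applyP (pvParse y.toList).1 c s)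
      (keysK (pvParse y.toList).1) (List.replicate y.toList.length 'A')
      (prodRepeat ["CG", "GC"] (pvParse y.toList).1.length)
      (fun c hc s t hs ht hag => by
        have hlc := length_mem_prodRepeat _ _ c hc
        show applyP (pvParse y.toList).1 c s = applyP (pvParse y.toList).1 c t
        rw [applyP_eq_applyUpd, applyP_eq_applyUpd]
        exact applyUpd_congr _ s t (by rw [hs, ht])
          (fun k => by rw [keys_updsP _ _ hlc]; exact hag k))
      (fun c hc s => by
        show (applyP (pvParse y.toList).1 c s).length = s.length
        rw [applyP_eq_applyUpd, length_applyUpd])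
      (fun c hc s k hk => by
        show (applyP (pvParse y.toList).1 c s)[k]? = s[k]?
        rw [applyP_eq_applyUpd,
          getElem?_applyUpd_notMem _ s k
            (by rw [keys_updsP _ _ (length_mem_prodRepeat _ _ c hc)]; exact hk)])
      [] (List.replicate y.toList.length 'A') rfl (fun k => Or.inr rfl)
    simp only [List.nil_append] at h
    rw [h, ← List.map_eq_flatMap]
  | false =>
    simp only [Bool.false_eq_true, reduceIte]
    rw [goPairs_eq]
    simp only [goUnp_eq]
    rw [foldl_prod]
    have h := foldElim
      (fun (c : List String × List Char) s =>
        applyU (pvParse y.toList).2 c.2 (applyP (pvParse y.toList).1 c.1 s))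
      (keysK (pvParse y.toList).1 ++ (pvParse y.toList).2) (List.replicate y.toList.length 'A')
      ((prodRepeat ["CG", "GC", "AU", "UA", "GU", "UG"] (pvParse y.toList).1.length).flatMap
        (fun c1 => (prodRepeat ['A', 'C', 'G', 'U'] (pvParse y.toList).2.length).map
          (fun c2 => (c1, c2))))
      (fun c hc => by
        simp only [List.mem_flatMap, List.mem_map] at hc
        obtain ⟨c1, hc1, c2, hc2, rfl⟩ := hc
        exact (hyps_comp _ _ _ _ (length_mem_prodRepeat _ _ _ hc1)
          (length_mem_prodRepeat _ _ _ hc2)).1)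
      (fun c hc => by
        simp only [List.mem_flatMap, List.mem_map] at hc
        obtain ⟨c1, hc1, c2, hc2, rfl⟩ := hc
        exact (hyps_comp _ _ (List.replicate y.toList.length 'A') _
          (length_mem_prodRepeat _ _ _ hc1) (length_mem_prodRepeat _ _ _ hc2)).2.1)
      (fun c hc => by
        simp only [List.mem_flatMap, List.mem_map] at hc
        obtain ⟨c1, hc1, c2, hc2, rfl⟩ := hc
        exact (hyps_comp _ _ (List.replicate y.toList.length 'A') _
          (length_mem_prodRepeat _ _ _ hc1) (length_mem_prodRepeat _ _ _ hc2)).2.2)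
      [] (List.replicate y.toList.length 'A') rfl (fun k => Or.inr rfl)
    simp only [List.nil_append] at h
    rw [h]
    simp only [List.map_flatMap, List.map_map]
    rfl
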